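-- pv_equiv track=rewrite | github.com/raeez/chiral-bar-cobar | compute/lib/coulomb_higgs_shadow_engine.py | slodowy_slice_dim
-- ===== SOURCE A (Python) =====
-- from typing import Dict, List, Optional, Tuple
--
-- def slodowy_slice_dim(N: int, partition: List[int]) -> int:
--     r"""Dimension of Slodowy slice S_lambda in sl_N.
--
--     dim S_lambda = dim sl_N - dim O_lambda = (N^2 - 1) - dim O_lambda.
--
--     dim O_lambda = N^2 - sum_i (lambda_i')^2 where lambda' is the
--     transpose partition.
--     """
--     # Compute transpose partition
--     if not partition:
--         return N * N - 1
--     max_part = max(partition)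
--     transpose = []
--     for i in range(1, max_part + 1):
--         transpose.append(sum(1 for p in partition if p >= i))
--
--     dim_orbit = N * N - sum(t * t for t in transpose)
--     return (N * N - 1) - dim_orbit
-- ===== SOURCE B (Python) =====
-- def slodowy_slice_dim(N: int, partition: list) -> int:
--     # Empty partition: zero orbit, the slice is all of sl_N.
--     if not partition:
--         return N * N - 1
--     # sum_i (lambda'_i)^2 = sum_j (2j+1)*lambda_j over the positive parts
--     # sorted in descending order (j counted from 0); N^2 cancels out.
--     parts = sorted((p for p in partition if p > 0), reverse=True)
--     return sum((2 * j + 1) * p for j, p in enumerate(parts)) - 1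
-- ===== Notes on version B (the rewrite author's own statement) =====
-- stated objective: faster
-- what changed: Instead of building the transpose partition with an O(max_part * n) double loop, B sorts the positive parts in descending order and uses the identity sum_i (lambda'_i)^2 = sum_j (2j+1)*lambda_j, so the N^2 terms cancel and one linear pass over the sorted parts gives the result.
import Mathlib
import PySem

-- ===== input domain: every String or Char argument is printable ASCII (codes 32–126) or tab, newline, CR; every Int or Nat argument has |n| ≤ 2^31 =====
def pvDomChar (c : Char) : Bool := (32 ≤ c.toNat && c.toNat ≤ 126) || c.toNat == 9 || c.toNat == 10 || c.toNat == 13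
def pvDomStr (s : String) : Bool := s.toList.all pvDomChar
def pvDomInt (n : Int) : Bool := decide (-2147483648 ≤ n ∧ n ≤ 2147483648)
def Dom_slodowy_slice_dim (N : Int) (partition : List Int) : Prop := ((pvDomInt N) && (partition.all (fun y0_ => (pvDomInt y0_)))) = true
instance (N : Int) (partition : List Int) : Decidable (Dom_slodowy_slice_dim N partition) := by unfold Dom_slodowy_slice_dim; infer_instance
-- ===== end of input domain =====

-- B replaces A's transpose-partition double loop by the identity
-- Σ_i (λ'_i)² = Σ_j (2j+1)·λ_j over the positive parts sorted descending.

-- ===== PORT A =====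
def slodowy_slice_dim (N : Int) (partition : List Int) : Int :=
  if partition = [] then N * N - 1
  else
    -- max(partition): partition ≠ [] here, so max? = some and the getD default is unreachable
    let max_part := (PySem.List.max? partition (fun x => x)).getD 0
    let transpose := (PySem.List.pyRange 1 (max_part + 1) 1).foldl
      (fun acc i => acc ++ [(partition.map (fun p => if p ≥ i then (1 : Int) else 0)).sum]) []
    let dim_orbit := N * N - (transpose.map (fun t => t * t)).sum
    (N * N - 1) - dim_orbit

-- ===== PORT B =====
def slodowy_slice_dim_alt (N : Int) (partition : List Int) : Int :=
  if partition = [] then N * N - 1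
  else
    let parts := PySem.List.sorted (partition.filter (fun p => 0 < p)) (fun x => x) true
    ((PySem.List.enumerate parts 0).map (fun jp => (2 * jp.1 + 1) * jp.2)).sum - 1

-- ===== PRECONDITION & SPEC =====
def Spec_slodowy_slice_dim (N : Int) (partition : List Int) (out : Int) : Prop := out = slodowy_slice_dim_alt N partition
instance (N : Int) (partition : List Int) (out : Int) : Decidable (Spec_slodowy_slice_dim N partition out) := by unfold Spec_slodowy_slice_dim; infer_instance

-- ===== CLAIM (what is proved, stated in full; the proofs are below) =====
def Claim_equal_slodowy_slice_dim : Prop := ∀ (N : Int) (partition : List Int), Dom_slodowy_slice_dim N partition → Spec_slodowy_slice_dim N partition (slodowy_slice_dim N partition)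

-- ===== LEMMAS AND PROOFS =====

-- Σ_{i=1}^{a} [i ≤ y] = y  for 1 ≤ y ≤ a
theorem pv_sum_indicator (a y : Int) (h1 : 1 ≤ y) (h2 : y ≤ a) :
    ((PySem.List.pyRange 1 (a + 1) 1).map (fun i => if i ≤ y then (1 : Int) else 0)).sum = y := by
  rw [PySem.List.pyRange_one_append 1 (y+1) (a+1) (by omega) (by omega)]
  rw [List.map_append, List.sum_append]
  have e1 : List.map (fun i => if i ≤ y then (1:Int) else 0) (PySem.List.pyRange 1 (y+1)) =
      List.map (fun _ => (1:Int)) (PySem.List.pyRange 1 (y+1)) := by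
    apply List.map_congr_left
    intro i hi
    rw [PySem.List.mem_pyRange_one] at hi
    rw [if_pos (by omega)]
  have e2 : List.map (fun i => if i ≤ y then (1:Int) else 0) (PySem.List.pyRange (y+1) (a+1)) =
      List.map (fun _ => (0:Int)) (PySem.List.pyRange (y+1) (a+1)) := by
    apply List.map_congr_left
    intro i hi
    rw [PySem.List.mem_pyRange_one] at hi
    rw [if_neg (by omega)]
  rw [e1, e2, PySem.List.sum_map_const_int, PySem.List.sum_map_const_int, PySem.List.length_pyRange_one]
  simp
  omega

-- Σ_{i=1}^{a} countP (i ≤ ·) t = sum t  for t with entries in [1, a]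
theorem pv_sum_count (t : List Int) (a : Int) (h : ∀ y ∈ t, 1 ≤ y ∧ y ≤ a) :
    ((PySem.List.pyRange 1 (a + 1) 1).map (fun i => (t.countP (fun p => i ≤ p) : Int))).sum = t.sum := by
  induction t with
  | nil => simp
  | cons y t ih =>
    have e : List.map (fun i => ((List.countP (fun p => decide (i ≤ p)) (y :: t) : Nat) : Int)) (PySem.List.pyRange 1 (a+1)) =
        List.map (fun i => ((List.countP (fun p => decide (i ≤ p)) t : Nat) : Int) + (if i ≤ y then (1:Int) else 0)) (PySem.List.pyRange 1 (a+1)) := by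
      apply List.map_congr_left
      intro i _
      rw [List.countP_cons]
      push_cast
      by_cases hiy : i ≤ y <;> simp [hiy]
    simp only [e]
    rw [PySem.List.sum_map_add_int]
    rw [ih (fun y hy => h y (List.mem_cons_of_mem _ hy))]
    rw [pv_sum_indicator a y (h y (List.mem_cons_self)).1 (h y (List.mem_cons_self)).2]
    simp [add_comm]

-- shifting the enumerate start by s adds 2·s·(sum of the list)
theorem pv_enum_shift (t : List Int) (s : Int) :
    ((PySem.List.enumerate t s).map (fun jp => (2 * jp.1 + 1) * jp.2)).sum
      = 2 * s * t.sum + ((PySem.List.enumerate t 0).map (fun jp => (2 * jp.1 + 1) * jp.2)).sum := by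
  induction t generalizing s with
  | nil => simp [PySem.List.enumerate_nil]
  | cons p t ih =>
    rw [PySem.List.enumerate_cons, PySem.List.enumerate_cons]
    simp only [List.map_cons, List.sum_cons, List.sum_cons]
    rw [ih (s+1), ih (0+1)]
    ring

-- core identity: for ys descending, positive, bounded by m:
-- Σ_{i=1}^{m} (countP (i ≤ ·) ys)² = Σ_j (2j+1)·ys_j
theorem pv_main (ys : List Int) (m : Int)
    (hs : ys.Pairwise (fun a b => b ≤ a)) (hp : ∀ y ∈ ys, 0 < y) (hm : ∀ y ∈ ys, y ≤ m) :
    ((PySem.List.pyRange 1 (m + 1) 1).map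
        (fun i => (ys.countP (fun p => i ≤ p) : Int) * (ys.countP (fun p => i ≤ p) : Int))).sum
      = ((PySem.List.enumerate ys 0).map (fun jp => (2 * jp.1 + 1) * jp.2)).sum := by
  induction ys generalizing m with
  | nil =>
    have e : List.map (fun i => ((List.countP (fun p => decide (i ≤ p)) ([]:List Int) : Nat) : Int) * ((List.countP (fun p => decide (i ≤ p)) ([]:List Int) : Nat) : Int)) (PySem.List.pyRange 1 (m+1)) =
        List.map (fun _ => (0:Int)) (PySem.List.pyRange 1 (m+1)) := by
      apply List.map_congr_left; intro i _; simp
    rw [e, PySem.List.sum_map_const_int]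
    simp [PySem.List.enumerate_nil]
  | cons a t ih =>
    rw [List.pairwise_cons] at hs
    have hta : ∀ y ∈ t, y ≤ a := hs.1
    have ha1 : 1 ≤ a := hp a List.mem_cons_self
    have ham : a ≤ m := hm a List.mem_cons_self
    -- split the range at a+1
    rw [PySem.List.pyRange_one_append 1 (a+1) (m+1) (by omega) (by omega)]
    rw [List.map_append, List.sum_append]
    -- high part vanishes
    have ehi : List.map (fun i => ((List.countP (fun p => decide (i ≤ p)) (a :: t) : Nat) : Int) * ((List.countP (fun p => decide (i ≤ p)) (a :: t) : Nat) : Int)) (PySem.List.pyRange (a+1) (m+1)) =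
        List.map (fun _ => (0:Int)) (PySem.List.pyRange (a+1) (m+1)) := by
      apply List.map_congr_left; intro i hi
      rw [PySem.List.mem_pyRange_one] at hi
      have : List.countP (fun p => decide (i ≤ p)) (a :: t) = 0 := by
        rw [List.countP_eq_zero]
        intro p hpmem
        rcases List.mem_cons.mp hpmem with rfl | hpt
        · simp; omega
        · have := hta p hpt; simp; omega
      rw [this]; simp
    -- low part: count for (a::t) is count for t plus one; square it out
    have elo : List.map (fun i => ((List.countP (fun p => decide (i ≤ p)) (a :: t) : Nat) : Int) * ((List.countP (fun p => decide (i ≤ p)) (a :: t) : Nat) : Int)) (PySem.List.pyRange 1 (a+1)) =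
        List.map (fun i => (((List.countP (fun p => decide (i ≤ p)) t : Nat) : Int) * ((List.countP (fun p => decide (i ≤ p)) t : Nat) : Int)) + ((((List.countP (fun p => decide (i ≤ p)) t : Nat) : Int) + ((List.countP (fun p => decide (i ≤ p)) t : Nat) : Int)) + 1)) (PySem.List.pyRange 1 (a+1)) := by
      apply List.map_congr_left; intro i hi
      rw [PySem.List.mem_pyRange_one] at hi
      rw [List.countP_cons, if_pos (by simp; omega)]
      push_cast
      ring
    rw [ehi, elo, PySem.List.sum_map_const_int, PySem.List.sum_map_add_int, PySem.List.sum_map_add_int, PySem.List.sum_map_add_int]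
    have e1 := ih a hs.2 (fun y hy => hp y (List.mem_cons_of_mem _ hy)) hta
    have e2 := pv_sum_count t a (fun y hy => ⟨hp y (List.mem_cons_of_mem _ hy), hta y hy⟩)
    have e3 : ((List.map (fun _ => (1:Int)) (PySem.List.pyRange 1 (a+1))).sum) = a := by
      rw [PySem.List.sum_map_const_int, PySem.List.length_pyRange_one]; simp; omega
    -- RHS
    rw [PySem.List.enumerate_cons]
    simp only [List.map_cons, List.sum_cons]
    rw [pv_enum_shift t (0+1)]
    simp only [e1, e2, e3]
    ring

-- ===== VERDICT (by name: the statement is the Claim_ definition above) =====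
theorem slodowy_slice_dim_spec : Claim_equal_slodowy_slice_dim := by
  intro N partition _
  unfold Spec_slodowy_slice_dim slodowy_slice_dim slodowy_slice_dim_alt
  by_cases hnil : partition = []
  · simp [hnil]
  · simp only [if_neg hnil]
    obtain ⟨M, hM⟩ : ∃ M, PySem.List.max? partition (fun x => x) = some M := by
      cases h : PySem.List.max? partition (fun x => x) with
      | none => exact absurd ((PySem.List.max?_eq_none_iff _ _).mp h) hnil
      | some M => exact ⟨M, rfl⟩
    simp only [hM, Option.getD_some, PySem.List.foldl_append_singleton_eq_map, List.nil_append,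
      List.map_map]
    set parts := PySem.List.sorted (partition.filter (fun p => 0 < p)) (fun x => x) true with hparts
    have hperm : parts.Perm (partition.filter (fun p => 0 < p)) := PySem.List.sorted_perm _ _ _
    have hbridge : ∀ i : Int, 1 ≤ i →
        partition.countP (fun p => decide (i ≤ p)) = parts.countP (fun p => decide (i ≤ p)) := by
      intro i hi
      rw [hperm.countP_eq, List.countP_filter]
      apply List.countP_congr
      intro p _
      by_cases h : i ≤ p
      · simp [h]
        omega
      · simp [h]
    have hinner : (PySem.List.pyRange 1 (M + 1)).map
          ((fun t => t * t) ∘ fun i => (partition.map (fun p => if p ≥ i then (1 : Int) else 0)).sum)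
        = (PySem.List.pyRange 1 (M + 1)).map
          (fun i => (parts.countP (fun p => i ≤ p) : Int) * (parts.countP (fun p => i ≤ p) : Int)) := by
      apply List.map_congr_left
      intro i hi
      rw [PySem.List.mem_pyRange_one] at hi
      have e : (partition.map (fun p => if p ≥ i then (1 : Int) else 0)).sum
          = (partition.countP (fun p => decide (i ≤ p)) : Int) := by
        rw [← PySem.List.sum_map_ite_one_zero (fun p => decide (i ≤ p)) partition]
        apply congrArg
        apply List.map_congr_left
        intro p _
        simp
      simp only [Function.comp_apply, e, hbridge i hi.1]
    rw [hinner, pv_main parts M]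
    · ring
    · exact PySem.List.sorted_pairwise_rev _ _
    · intro y hy
      exact of_decide_eq_true (List.mem_filter.mp (hperm.mem_iff.mp hy)).2
    · intro y hy
      exact PySem.List.max?_isMax hM y (List.mem_filter.mp (hperm.mem_iff.mp hy)).1
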